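-- pv_equiv track=rewrite | github.com/crary/python_exercises | convertString_2integer.py | convertStringToInteger
-- ===== SOURCE A (Python) =====
-- def convertStringToInteger(stringNum):
--
--
--     ## Check if iteger is Zero
--     if stringNum == '0':
--         return 0
--
--
--      ## Create integer to string dictionary
--     DIGITS_INT_TO_STR = {'0': 0, '1': 1, '2': 2, '3': 3, '4': 4, '5': 5, '6': 6, '7': 7, '8': 8, '9': 9}
--
--     if stringNum[0] == '-':
--         isNegative = True
--         stringNum = stringNum[1:]
--     else:
--         isNegative = False
--
--     ## Integer starts at zero
--     integerNum = 0
--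
--
--     for i in range(len(stringNum)):
--         digit = DIGITS_INT_TO_STR[stringNum[i]]
--         integerNum = (integerNum * 10) + digit
--
--     if isNegative:
--         return -integerNum
--     else:
--         return integerNum
-- ===== SOURCE B (Python) =====
-- def convertStringToInteger(stringNum):
--     DIGITS_INT_TO_STR = {'0': 0, '1': 1, '2': 2, '3': 3, '4': 4,
--                          '5': 5, '6': 6, '7': 7, '8': 8, '9': 9}
--     if stringNum[0] == '-':
--         sign, digits = -1, stringNum[1:]
--     else:
--         sign, digits = 1, stringNum
--     result, place = 0, 1
--     for ch in reversed(digits):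
--         result += DIGITS_INT_TO_STR[ch] * place
--         place *= 10
--     return sign * result
-- ===== Notes on version B (the rewrite author's own statement) =====
-- stated objective: alternative
-- what changed: Drops the redundant zero early-return and replaces the left-to-right Horner accumulation (acc*10+digit) with a right-to-left positional sum that walks the reversed digit string keeping an increasing place multiplier; the minus sign is applied as a factor at the end.
import Mathlib
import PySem

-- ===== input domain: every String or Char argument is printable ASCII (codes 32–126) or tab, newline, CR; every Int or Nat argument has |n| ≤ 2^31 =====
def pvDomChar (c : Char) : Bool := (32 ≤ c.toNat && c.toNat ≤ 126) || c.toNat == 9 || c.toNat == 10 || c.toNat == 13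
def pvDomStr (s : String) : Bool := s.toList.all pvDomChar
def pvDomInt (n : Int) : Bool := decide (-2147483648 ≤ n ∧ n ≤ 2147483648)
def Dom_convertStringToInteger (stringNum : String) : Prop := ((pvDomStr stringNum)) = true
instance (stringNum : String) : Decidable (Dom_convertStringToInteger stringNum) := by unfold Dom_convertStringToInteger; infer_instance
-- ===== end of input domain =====

-- B replaces the Horner fold (acc*10+digit) and the zero early-return by a positional sum over
-- the reversed digits with an increasing place multiplier; the minus sign is applied as a factor
-- at the end. Pre_ excludes exactly the inputs where the Python raises (empty string: IndexError;
-- any non-digit after the optional leading minus: KeyError); both programs raise identically there.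

-- ===== PORT A =====
-- the DIGITS_INT_TO_STR dict of both Pythons
def pvDigits : PySem.Dict Char Int :=
  PySem.Dict.ofList [('0', 0), ('1', 1), ('2', 2), ('3', 3), ('4', 4),
   ('5', 5), ('6', 6), ('7', 7), ('8', 8), ('9', 9)]

-- DIGITS_INT_TO_STR[c]; KeyError (= none, outside Pre_) rendered as 0
def pvDigitVal (c : Char) : Int := (PySem.Dict.get? pvDigits c).getD 0

def convertStringToInteger (stringNum : String) : Int :=
  if stringNum = "0" then 0
  else
    match stringNum.toList with
    | [] => 0   -- stringNum[0] raises IndexError in Python; outside Pre_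
    | c :: rest =>
      let (isNegative, digits) := if c = '-' then (true, rest) else (false, c :: rest)
      let integerNum := digits.foldl (fun acc d => acc * 10 + pvDigitVal d) 0
      if isNegative then -integerNum else integerNum

-- ===== PORT B =====
def convertStringToInteger_alt (stringNum : String) : Int :=
  match stringNum.toList with
  | [] => 0   -- stringNum[0] raises IndexError in Python; outside Pre_
  | c :: rest =>
    let (sign, digits) : Int × List Char := if c = '-' then (-1, rest) else (1, c :: rest)
    let rp := digits.reverse.foldl
      (fun (p : Int × Int) ch => (p.1 + pvDigitVal ch * p.2, p.2 * 10)) (0, 1)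
    sign * rp.1

-- ===== PRECONDITION & SPEC =====
-- Pre_ excludes exactly the inputs on which Python A raises: the empty string (IndexError)
-- and strings with a non-digit character after the optional leading '-' (KeyError).
def Pre_convertStringToInteger (stringNum : String) : Prop :=
  stringNum.toList ≠ [] ∧
  (if stringNum.toList.head? = some '-' then stringNum.toList.tail else stringNum.toList).all
    (fun c => decide ('0' ≤ c) && decide (c ≤ '9')) = true
instance (stringNum : String) : Decidable (Pre_convertStringToInteger stringNum) := by
  unfold Pre_convertStringToInteger; infer_instance

def pvWitness_convertStringToInteger : String := "-3"

def Spec_convertStringToInteger (stringNum : String) (out : Int) : Prop := out = convertStringToInteger_alt stringNum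
instance (stringNum : String) (out : Int) : Decidable (Spec_convertStringToInteger stringNum out) := by unfold Spec_convertStringToInteger; infer_instance

-- ===== CLAIM (what is proved, stated in full; the proofs are below) =====
def Claim_equal_convertStringToInteger : Prop := ∀ (stringNum : String), Dom_convertStringToInteger stringNum → Pre_convertStringToInteger stringNum → Spec_convertStringToInteger stringNum (convertStringToInteger stringNum)

-- ===== LEMMAS AND PROOFS =====

-- B's reversed place-value fold equals A's Horner fold (on any char list).
theorem pv_revfold_eq_horner (l : List Char) (r p : Int) :
    l.reverse.foldl (fun (q : Int × Int) ch => (q.1 + pvDigitVal ch * q.2, q.2 * 10)) (r, p)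
      = (r + p * l.foldl (fun acc d => acc * 10 + pvDigitVal d) 0, p * 10 ^ l.length) := by
  induction l using List.reverseRecOn generalizing r p with
  | nil => simp
  | append_singleton xs x ih =>
      simp only [List.reverse_append, List.reverse_cons, List.reverse_nil, List.nil_append,
        List.cons_append, List.foldl_cons, List.foldl_append, List.foldl_nil, List.length_append,
        List.length_cons, List.length_nil, ih]
      simp only [Prod.mk.injEq]
      constructor <;> ring

-- ===== VERDICT (by name: the statement is the Claim_ definition above) =====
theorem convertStringToInteger_spec : Claim_equal_convertStringToInteger := by
  intro s _ _
  unfold Spec_convertStringToInteger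
  have key : ∀ c rest, (s.toList = c :: rest) →
      (let (isNegative, digits) := if c = '-' then (true, rest) else (false, c :: rest)
       let integerNum := digits.foldl (fun acc d => acc * 10 + pvDigitVal d) 0
       if isNegative then -integerNum else integerNum)
      = convertStringToInteger_alt s := by
    intro c rest hl
    unfold convertStringToInteger_alt
    rw [hl]
    by_cases hc : c = '-' <;>
      simp only [hc, ite_true, ite_false] <;>
      rw [pv_revfold_eq_horner] <;> simp <;> try ring
  unfold convertStringToInteger
  by_cases h0 : s = "0"
  · rw [if_pos h0, ← key '0' [] (by rw [h0]; rfl)]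
    decide
  · rw [if_neg h0]
    cases hl : s.toList with
    | nil => unfold convertStringToInteger_alt; rw [hl]
    | cons c rest => exact key c rest hl
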